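-- pv_equiv track=rewrite | github.com/shubham11941140/Leetcode-Solutions | 1524-158-2099-find-subsequence-of-length-k-with-the-largest-sum/1524-158-2099-find-subsequence-of-length-k-with-the-largest-sum.py | maxSubsequence
-- ===== SOURCE A (Python) =====
-- from typing import List
--
-- def maxSubsequence(nums: List[int], k: int) -> List[int]:
--     g = sorted(nums)[::-1][:k]
--     n = []
--     for i in nums:
--         if i in g:
--             n.append(i)
--             g.remove(i)
--     return n
-- ===== SOURCE B (Python) =====
-- from typing import List
--
-- def maxSubsequence(nums: List[int], k: int) -> List[int]:
--     # Threshold algorithm: sort once ascending, read off the k-th largest value t,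
--     # then a single pass keeps every element > t and ties == t up to a quota.
--     n = len(nums)
--     m = min(k, n)
--     if m <= 0:
--         return []
--     s = sorted(nums)
--     t = s[n - m]
--     quota = m - sum(1 for x in nums if x > t)
--     out = []
--     for x in nums:
--         if x > t:
--             out.append(x)
--         elif x == t and quota > 0:
--             out.append(x)
--             quota -= 1
--     return out
-- ===== Notes on version B (the rewrite author's own statement) =====
-- stated objective: faster
-- what changed: Replaces A's materialised top-k list with per-element membership scan and g.remove (O(k) each) by a scalar threshold: the k-th largest value read from one ascending sort plus a tie quota, consumed in a single comparison-only pass.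
-- outside the precondition, e.g. on maxSubsequence([3, 1, 2], -1): A returns [3, 2], B returns []
import Mathlib
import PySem

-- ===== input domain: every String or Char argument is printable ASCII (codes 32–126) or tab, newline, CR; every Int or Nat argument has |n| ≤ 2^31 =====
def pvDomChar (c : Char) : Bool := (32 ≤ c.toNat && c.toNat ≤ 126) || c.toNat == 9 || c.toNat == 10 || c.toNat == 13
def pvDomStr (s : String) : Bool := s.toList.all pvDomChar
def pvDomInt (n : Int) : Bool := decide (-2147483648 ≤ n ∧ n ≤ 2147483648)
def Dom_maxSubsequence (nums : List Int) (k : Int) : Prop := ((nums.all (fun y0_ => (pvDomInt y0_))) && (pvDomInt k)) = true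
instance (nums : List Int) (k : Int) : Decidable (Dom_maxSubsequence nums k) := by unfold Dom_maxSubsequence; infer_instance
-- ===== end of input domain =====

-- B replaces A's top-k list (per-element membership scan + list remove) by a scalar
-- threshold: the k-th largest value plus a tie quota, consumed in one pass (objective: faster).

-- ===== PORT A =====
-- step of A's for-loop: state = (n, g); 'if i in g: n.append(i); g.remove(i)'
-- g.remove(i) inside 'i in g' never raises, so '.getD st.2' is never taken on the raising branch
def pvStepA (st : List Int × List Int) (i : Int) : List Int × List Int :=
  if st.2.contains i then (st.1 ++ [i], (PySem.List.remove? st.2 i).getD st.2) else st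

def maxSubsequence (nums : List Int) (k : Int) : List Int :=
  -- g = sorted(nums)[::-1][:k]; [::-1] is reverse
  let g := PySem.List.slice ((PySem.List.sorted nums (fun x => x) false).reverse) none (some k)
  (nums.foldl pvStepA ([], g)).1

-- ===== PORT B =====
-- B's main loop: for x in nums: if x > t: append elif x == t and quota > 0: append, quota -= 1
def pvLoopB (t quota : Int) (out : List Int) : List Int → List Int
  | [] => out
  | x :: r =>
      if t < x then pvLoopB t quota (out ++ [x]) r
      else if x = t ∧ 0 < quota then pvLoopB t (quota - 1) (out ++ [x]) r
      else pvLoopB t quota out r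

def maxSubsequence_alt (nums : List Int) (k : Int) : List Int :=
  let n := nums.length
  let m := min k (n : Int)
  if m ≤ 0 then []
  else
    let s := PySem.List.sorted nums (fun x => x) false
    -- t = s[n - m]; the index is in range since 0 < m ≤ n
    let t := (PySem.List.pyGet? s ((n : Int) - m)).getD 0
    -- quota = m - sum(1 for x in nums if x > t)
    let quota := m - ((nums.filter (fun x => t < x)).length : Int)
    pvLoopB t quota [] nums

-- ===== PRECONDITION & SPEC =====
-- Pre_ excludes only -len(nums) < k < 0, where A's slice [:k] still returns a value (it keeps
-- all but the |k| largest) — outside the problem's meaning of k as a count — while B naturally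
-- returns [] there; for k ≤ -len(nums) both return [] and the claim covers it.
def Pre_maxSubsequence (nums : List Int) (k : Int) : Prop := 0 ≤ k ∨ k + (nums.length : Int) ≤ 0
instance (nums : List Int) (k : Int) : Decidable (Pre_maxSubsequence nums k) := by unfold Pre_maxSubsequence; infer_instance
def pvWitness_maxSubsequence : List Int × Int := ([3, 1, 2], 2)

def Spec_maxSubsequence (nums : List Int) (k : Int) (out : List Int) : Prop := out = maxSubsequence_alt nums k
instance (nums : List Int) (k : Int) (out : List Int) : Decidable (Spec_maxSubsequence nums k out) := by unfold Spec_maxSubsequence; infer_instance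

-- ===== CLAIM (what is proved, stated in full; the proofs are below) =====
def Claim_equal_maxSubsequence : Prop := ∀ (nums : List Int) (k : Int), Dom_maxSubsequence nums k → Pre_maxSubsequence nums k → Spec_maxSubsequence nums k (maxSubsequence nums k)

-- ===== LEMMAS AND PROOFS =====

-- once g is empty A's loop never appends again
lemma foldA_nil : ∀ (rest out : List Int), (rest.foldl pvStepA (out, ([] : List Int))).1 = out := by
  intro rest
  induction rest with
  | nil => intro out; rfl
  | cons x rest ih => intro out; simpa [pvStepA] using ih out

-- main invariant: g holds every remaining copy of each value above t, exactly `quota`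
-- copies of t, and nothing below t
lemma loop_eq : ∀ (rest g out : List Int) (t quota : Int),
    (∀ x, t < x → (g.count x : Int) = rest.count x) →
    ((g.count t : Int) = quota) →
    (∀ x, x < t → g.count x = 0) →
    (rest.foldl pvStepA (out, g)).1 = pvLoopB t quota out rest := by
  intro rest
  induction rest with
  | nil => intro g out t quota _ _ _; rfl
  | cons x r ih =>
    intro g out t quota h1 h2 h3
    rcases lt_trichotomy t x with hlt | heq | hgt
    · -- x > t : both sides emit x
      have hnx : g.count x = r.count x + 1 := by
        have := h1 x hlt
        have hc : (x :: r).count x = r.count x + 1 := by simp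
        omega
      have hmem : x ∈ g := List.count_pos_iff.mp (by omega)
      have step : pvStepA (out, g) x = (out ++ [x], g.erase x) := by
        simp [pvStepA, hmem, PySem.List.remove?_eq_some_erase g x hmem]
      rw [List.foldl_cons, step]
      conv_rhs => rw [pvLoopB]
      rw [if_pos hlt]
      apply ih
      · intro y hy
        by_cases hyx : y = x
        · subst hyx
          have := List.count_erase_self (a := y) (l := g)
          omega
        · rw [List.count_erase_of_ne hyx, h1 y hy]
          have : (x :: r).count y = r.count y := List.count_cons_of_ne (by omega)
          omega
      · rw [List.count_erase_of_ne (by omega : t ≠ x)]; exact h2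
      · intro y hy
        rw [List.count_erase_of_ne (by omega : y ≠ x)]; exact h3 y hy
    · -- x = t : emit iff the quota is positive
      obtain rfl : x = t := heq.symm
      by_cases hq : 0 < g.count x
      · have hmem : x ∈ g := List.count_pos_iff.mp hq
        have step : pvStepA (out, g) x = (out ++ [x], g.erase x) := by
          simp [pvStepA, hmem, PySem.List.remove?_eq_some_erase g x hmem]
        rw [List.foldl_cons, step]
        conv_rhs => rw [pvLoopB]
        rw [if_neg (lt_irrefl x), if_pos ⟨rfl, by omega⟩]
        apply ih
        · intro y hy
          rw [List.count_erase_of_ne (by omega : y ≠ x), h1 y hy]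
          have : (x :: r).count y = r.count y := List.count_cons_of_ne (by omega)
          omega
        · have := List.count_erase_self (a := x) (l := g)
          omega
        · intro y hy
          rw [List.count_erase_of_ne (by omega : y ≠ x)]; exact h3 y hy
      · have hmem : x ∉ g := fun h => hq (List.count_pos_iff.mpr h)
        have step : pvStepA (out, g) x = (out, g) := by simp [pvStepA, hmem]
        rw [List.foldl_cons, step]
        conv_rhs => rw [pvLoopB]
        rw [if_neg (lt_irrefl x), if_neg (by omega)]
        apply ih
        · intro y hy
          rw [h1 y hy]
          have : (x :: r).count y = r.count y := List.count_cons_of_ne (by omega)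
          omega
        · exact h2
        · exact h3
    · -- x < t : both sides skip x
      have hz := h3 x hgt
      have hmem : x ∉ g := by
        intro h
        have := List.count_pos_iff.mpr h
        omega
      have step : pvStepA (out, g) x = (out, g) := by simp [pvStepA, hmem]
      rw [List.foldl_cons, step]
      conv_rhs => rw [pvLoopB]
      rw [if_neg (by omega), if_neg (by omega)]
      apply ih
      · intro y hy
        rw [h1 y hy]
        have : (x :: r).count y = r.count y := List.count_cons_of_ne (by omega)
        omega
      · exact h2
      · exact h3

-- countP of a predicate and its negation partition the length
lemma countP_split (p : Int → Bool) : ∀ (l : List Int), l.countP p + l.countP (fun a => !p a) = l.length := by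
  intro l
  induction l with
  | nil => rfl
  | cons x r ih =>
    by_cases h : p x = true <;>
      simp [h, ← ih] <;> omega

-- ===== VERDICT (by name: the statement is the Claim_ definition above) =====
theorem maxSubsequence_spec : Claim_equal_maxSubsequence := by
  intro nums k _ hpre
  simp only [Spec_maxSubsequence, maxSubsequence, maxSubsequence_alt]
  set s := PySem.List.sorted nums (fun x => x) false with hs
  have hlen : s.length = nums.length := PySem.List.length_sorted nums _ false
  have hperm : s.Perm nums := PySem.List.sorted_perm nums _ false
  by_cases hk : 0 ≤ k
  case neg =>
    -- k ≤ -len(nums): A's slice is empty, B's m = min k n < 0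
    have hkn : k + (nums.length : Int) ≤ 0 := by
      rcases hpre with h | h
      · omega
      · exact h
    rw [if_pos (by omega : min k (nums.length : Int) ≤ 0)]
    have hgnil : PySem.List.slice s.reverse none (some k) = [] := by
      have hkk : k = -(((-k).toNat : Nat) : Int) := by omega
      rw [hkk, PySem.List.slice_to_neg_natCast _ _ (by omega)]
      have htz : s.reverse.length - (-k).toNat = 0 := by
        simp only [List.length_reverse, hlen]; omega
      rw [htz, List.take_zero]
    rw [hgnil, foldA_nil]
  rw [PySem.List.slice_to _ hk]
  by_cases hm : min k (nums.length : Int) ≤ 0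
  · -- m ≤ 0 with 0 ≤ k : k = 0 or nums = []
    rw [if_pos hm]
    by_cases hnil : nums = []
    · simp [hnil]
    · have hpos : 0 < nums.length := List.length_pos_iff.mpr hnil
      have hk0 : k = 0 := by
        rcases min_le_iff.mp hm with h | h
        · omega
        · omega
      simp [hk0, foldA_nil]
  · rw [if_neg hm]
    have hpair : s.Pairwise (· ≤ ·) := by
      simpa using PySem.List.sorted_pairwise nums (fun x => x)
    have hnpos : 0 < nums.length := by
      by_contra h
      have : nums.length = 0 := by omega
      rw [this] at hm; omega
    -- mNat = min k n as a natural number, j = n - mNat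
    set n := nums.length with hn
    have hmpos : 0 < min k (n : Int) := by omega
    set mNat : Nat := (min k (n : Int)).toNat with hmNat
    have hmle : mNat ≤ n := by omega
    have hmpos' : 0 < mNat := by omega
    set j : Nat := n - mNat with hj
    -- the index n - m equals (j : Int)
    have hidx : (n : Int) - min k (n : Int) = (j : Int) := by omega
    have hjlt : j < s.length := by omega
    -- t = s[j]
    have htdef : (PySem.List.pyGet? s ((n : Int) - min k (n : Int))).getD 0 = s[j] := by
      rw [hidx, PySem.List.pyGet?_natCast, List.getElem?_eq_getElem hjlt]; rfl
    rw [htdef]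
    set t := s[j] with ht
    -- the top-m list is the reverse of the tail s.drop j
    set suf := s.drop j with hsuf
    have hg : (s.reverse.take k.toNat) = suf.reverse := by
      by_cases hkn : k.toNat ≤ n
      · have : mNat = k.toNat := by omega
        rw [hsuf, hj, this, List.reverse_drop]
        congr 1
        omega
      · have h1 : s.reverse.take k.toNat = s.reverse := List.take_of_length_le (by simp; omega)
        have h2 : j = 0 := by omega
        rw [h1, hsuf, h2, List.drop_zero]
    rw [hg]
    -- structure of s around index j
    have hsplit : s = s.take j ++ suf := (List.take_append_drop j s).symm
    have hsufcons : suf = t :: s.drop (j + 1) := List.drop_eq_getElem_cons hjlt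
    have hsufpair : suf.Pairwise (· ≤ ·) := hpair.drop
    have hsufge : ∀ y ∈ suf, t ≤ y := by
      intro y hy
      rw [hsufcons] at hy hsufpair
      rcases hy with _ | hy
      · exact le_refl _
      · exact (List.pairwise_cons.mp hsufpair).1 y (by assumption)
    have hprele : ∀ a ∈ s.take j, a ≤ t := by
      intro a ha
      have := (List.pairwise_append.mp (hsplit ▸ hpair)).2.2
      exact this a ha t (by rw [hsufcons]; exact List.mem_cons_self)
    have hsuflen : suf.length = mNat := by
      rw [hsuf, List.length_drop]; omega
    -- counts over nums = counts over s, split at j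
    apply loop_eq
    · -- values above t: every copy is in suf
      intro x hx
      rw [List.count_reverse]
      have hsc : s.count x = (s.take j).count x + suf.count x := by
        conv_lhs => rw [hsplit]
        exact List.count_append ..
      have hpre0 : (s.take j).count x = 0 := by
        rw [List.count_eq_zero]
        intro hmem
        exact absurd (hprele x hmem) (by omega)
      have hnc : nums.count x = s.count x := (hperm.count_eq x).symm
      omega
    · -- copies of t in suf = m - #{x ∈ nums | x > t}
      rw [List.count_reverse]
      have hfilter : (nums.filter (fun x => decide (t < x))).length = nums.countP (fun x => decide (t < x)) :=
        (List.countP_eq_length_filter).symm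
      have hcp : nums.countP (fun x => decide (t < x)) = s.countP (fun x => decide (t < x)) :=
        (hperm.countP_eq _).symm
      have hscp : s.countP (fun x => decide (t < x)) =
          (s.take j).countP (fun x => decide (t < x)) + suf.countP (fun x => decide (t < x)) := by
        conv_lhs => rw [hsplit]
        exact List.countP_append ..
      have hpre0 : (s.take j).countP (fun x => decide (t < x)) = 0 := by
        rw [List.countP_eq_zero]
        intro a ha
        simpa using not_lt.mpr (hprele a ha)
      have hpart := countP_split (fun x => decide (t < x)) suf
      have hnot : suf.countP (fun a => !decide (t < a)) = suf.count t := by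
        rw [List.count_eq_countP]
        apply List.countP_congr
        intro a ha
        have := hsufge a ha
        by_cases h : a = t
        · simp [h]
        · simp [h]; omega
      omega
    · -- nothing below t
      intro x hx
      rw [List.count_reverse, List.count_eq_zero]
      intro hmem
      exact absurd (hsufge x hmem) (by omega)
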